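-- pv_equiv track=rewrite | github.com/PC1E-bit/OmniScenes | omniscenes/Omni-Real2Sim/pipeline/f_import_a_scene.py | get_cate_from_uid
-- ===== SOURCE A (Python) =====
-- def get_cate_from_uid(uid, cate_dict, partnetmobility_cate_dict):
--     if "/" not in uid:
--         for cate in cate_dict.keys():
--             for uid_ in cate_dict[cate]:
--                 if uid == uid_:
--                     return cate
--     else:
--         for cate in partnetmobility_cate_dict.keys():
--             for uid_ in partnetmobility_cate_dict[cate]:
--                 if uid == uid_:
--                     return cate
--     return "Unkonwn category,wrong uid"
-- ===== SOURCE B (Python) =====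
-- def get_cate_from_uid(uid, cate_dict, partnetmobility_cate_dict):
--     d = cate_dict if "/" not in uid else partnetmobility_cate_dict
--     index = {}
--     for cate, uids in d.items():
--         for u in uids:
--             index.setdefault(u, cate)
--     return index.get(uid, "Unkonwn category,wrong uid")
-- ===== Notes on version B (the rewrite author's own statement) =====
-- stated objective: alternative
-- what changed: Replaces the short-circuiting nested scan with first-match return by building a uid-to-category reverse index in one pass (setdefault keeps first-match semantics) followed by a single dictionary lookup with the original sentinel default.
import Mathlib
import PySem

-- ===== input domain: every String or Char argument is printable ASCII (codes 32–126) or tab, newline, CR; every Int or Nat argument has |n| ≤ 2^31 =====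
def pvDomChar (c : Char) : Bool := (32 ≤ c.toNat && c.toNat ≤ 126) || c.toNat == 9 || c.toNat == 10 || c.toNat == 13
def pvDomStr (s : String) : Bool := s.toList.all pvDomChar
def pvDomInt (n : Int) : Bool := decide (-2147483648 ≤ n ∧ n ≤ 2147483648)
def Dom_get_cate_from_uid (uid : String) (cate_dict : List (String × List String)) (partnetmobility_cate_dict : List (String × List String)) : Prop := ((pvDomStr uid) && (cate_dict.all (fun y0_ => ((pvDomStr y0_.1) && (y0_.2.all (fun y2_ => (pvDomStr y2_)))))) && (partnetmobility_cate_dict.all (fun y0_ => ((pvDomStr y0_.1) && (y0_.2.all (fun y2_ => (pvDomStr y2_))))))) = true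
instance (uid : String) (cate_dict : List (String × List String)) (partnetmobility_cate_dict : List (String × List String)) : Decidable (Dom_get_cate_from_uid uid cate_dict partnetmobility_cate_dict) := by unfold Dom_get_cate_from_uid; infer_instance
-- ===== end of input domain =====

-- B builds a uid→category reverse index in one pass (setdefault = first match wins) and does a single lookup, instead of A's short-circuiting nested scan; same cost, different structure.


-- ===== PORT A =====
def pvScanA (uid : String) : List (String × List String) → String
  | [] => "Unkonwn category,wrong uid"
  | (cate, uids) :: rest => if uids.contains uid then cate else pvScanA uid rest

def get_cate_from_uid (uid : String) (cate_dict : List (String × List String)) (partnetmobility_cate_dict : List (String × List String)) : String :=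
  if !(PySem.Str.isIn "/" uid) then pvScanA uid cate_dict
  else pvScanA uid partnetmobility_cate_dict

-- ===== PORT B =====
def get_cate_from_uid_alt (uid : String) (cate_dict : List (String × List String)) (partnetmobility_cate_dict : List (String × List String)) : String :=
  let d := if !(PySem.Str.isIn "/" uid) then cate_dict else partnetmobility_cate_dict
  let index : PySem.Dict String String :=
    d.foldl (fun idx p => p.2.foldl (fun idx u => idx.setdefault u p.1) idx) PySem.Dict.empty
  index.getD uid "Unkonwn category,wrong uid"

-- ===== PRECONDITION & SPEC =====
def Spec_get_cate_from_uid (uid : String) (cate_dict : List (String × List String)) (partnetmobility_cate_dict : List (String × List String)) (out : String) : Prop := out = get_cate_from_uid_alt uid cate_dict partnetmobility_cate_dict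
instance (uid : String) (cate_dict : List (String × List String)) (partnetmobility_cate_dict : List (String × List String)) (out : String) : Decidable (Spec_get_cate_from_uid uid cate_dict partnetmobility_cate_dict out) := by unfold Spec_get_cate_from_uid; infer_instance

-- ===== CLAIM (what is proved, stated in full; the proofs are below) =====
def Claim_equal_get_cate_from_uid : Prop := ∀ (uid : String) (cate_dict : List (String × List String)) (partnetmobility_cate_dict : List (String × List String)), Dom_get_cate_from_uid uid cate_dict partnetmobility_cate_dict → Spec_get_cate_from_uid uid cate_dict partnetmobility_cate_dict (get_cate_from_uid uid cate_dict partnetmobility_cate_dict)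

-- ===== LEMMAS AND PROOFS =====

-- ===== VERDICT (by name: the statement is the Claim_ definition above) =====

-- One inner pass: after folding setdefault over uids with category cate, looking up uid
-- gives the old binding if present, else cate when uid ∈ uids, else none.
theorem pv_inner (uid cate : String) (uids : List String) (idx : PySem.Dict String String) :
    (uids.foldl (fun idx u => idx.setdefault u cate) idx).get? uid
      = ((idx.get? uid).orElse (fun _ => if uids.contains uid then some cate else none)) := by
  induction uids generalizing idx with
  | nil => cases h : idx.get? uid <;> simp [h]
  | cons u us ih =>
    simp only [List.foldl_cons, ih]
    by_cases hc : idx.contains u = true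
    · rw [PySem.Dict.setdefault_of_contains idx cate hc]
      rcases h : idx.get? uid with _ | v
      · have hne : uid ≠ u := by
          intro he; subst he
          rw [PySem.Dict.contains_eq_isSome_get?, h] at hc; cases hc
        simp [hne]
      · simp
    · rw [PySem.Dict.setdefault_of_not_contains idx cate (by simpa using hc)]
      rw [PySem.Dict.get?_insert]
      by_cases he : uid = u
      · subst he
        have : idx.get? uid = none := by
          rw [PySem.Dict.get?_eq_none_iff_contains]; simpa using hc
        simp [this]
      · simp [he]

-- Outer pass: the reverse index built from d answers like the first-match scan, modulo idx.
theorem pv_outer (uid : String) (d : List (String × List String)) (idx : PySem.Dict String String) :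
    (d.foldl (fun idx p => p.2.foldl (fun idx u => idx.setdefault u p.1) idx) idx).getD uid "Unkonwn category,wrong uid"
      = ((idx.get? uid).getD (pvScanA uid d)) := by
  induction d generalizing idx with
  | nil => simp [pvScanA, PySem.Dict.getD_eq_get?_getD]
  | cons p rest ih =>
    obtain ⟨cate, uids⟩ := p
    simp only [List.foldl_cons, ih, pv_inner]
    rcases h : idx.get? uid with _ | v <;> simp [pvScanA] <;> (split <;> simp)

theorem get_cate_from_uid_spec : Claim_equal_get_cate_from_uid := by
  intro uid cd pd _
  unfold Spec_get_cate_from_uid get_cate_from_uid get_cate_from_uid_alt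
  split <;> simp [pv_outer, PySem.Dict.get?_empty]
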